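-- pv_equiv track=rewrite | github.com/elhamalghamdiUCD/Semi-Supervised-SLPA | Metrics/F_score.py | find_overlapping_nodes
-- ===== SOURCE A (Python) =====
-- from collections import defaultdict
--
-- def find_overlapping_nodes( communities ):
-- 	"""
-- 	Find the set of all nodes that have been assigned to more than one community
-- 	in the specified community set.
-- 	"""
-- 	community_counts = defaultdict(int)
-- 	for comm in communities:
-- 		for node_index in comm:
-- 			community_counts[node_index] += 1
-- 	overlapping_nodes = set()
-- 	for node_index in community_counts:
-- 		if community_counts[node_index] > 1:
-- 			overlapping_nodes.add( node_index )
-- 	return overlapping_nodes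
-- ===== SOURCE B (Python) =====
-- def find_overlapping_nodes(communities):
--     """
--     Find the set of all nodes that have been assigned to more than one community
--     in the specified community set.
--     """
--     nodes = sorted(node for comm in communities for node in comm)
--     dups = {b for a, b in zip(nodes, nodes[1:]) if a == b}
--     return {node for comm in communities for node in comm if node in dups}
-- ===== Notes on version B (the rewrite author's own statement) =====
-- stated objective: alternative
-- what changed: Replaces the count dictionary by sorting all node occurrences and collecting values that appear in adjacent equal pairs of the sorted list, then filtering the nodes by membership in that duplicate set; no counts are ever maintained.
import Mathlib
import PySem

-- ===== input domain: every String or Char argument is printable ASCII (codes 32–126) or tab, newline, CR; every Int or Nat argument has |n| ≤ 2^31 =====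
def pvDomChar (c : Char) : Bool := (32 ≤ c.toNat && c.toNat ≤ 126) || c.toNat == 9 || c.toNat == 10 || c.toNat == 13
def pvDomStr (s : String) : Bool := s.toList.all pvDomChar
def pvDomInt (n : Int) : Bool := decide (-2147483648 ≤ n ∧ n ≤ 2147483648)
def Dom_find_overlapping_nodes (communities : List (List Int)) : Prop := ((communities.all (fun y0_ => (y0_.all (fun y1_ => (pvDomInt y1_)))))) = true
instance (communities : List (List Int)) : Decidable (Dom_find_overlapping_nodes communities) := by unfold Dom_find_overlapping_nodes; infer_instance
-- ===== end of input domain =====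

-- B sorts all node occurrences and collects values appearing in adjacent equal pairs of the
-- sorted list, then keeps the nodes belonging to that duplicate set — an alternative algorithm
-- to A's count dictionary plus count>1 loop; return-value equivalence only.


-- ===== PORT A =====
def find_overlapping_nodes (communities : List (List Int)) : List Int :=
  let community_counts : PySem.Dict Int Int :=
    communities.foldl (fun d comm => comm.foldl (fun d node_index => d.modify node_index 0 (· + 1)) d) PySem.Dict.empty
  community_counts.keys.foldl
    (fun overlapping_nodes node_index =>
      if 1 < community_counts.getD node_index 0 then PySem.Set.add overlapping_nodes node_index
      else overlapping_nodes)
    PySem.Set.empty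

-- ===== PORT B =====
def find_overlapping_nodes_alt (communities : List (List Int)) : List Int :=
  -- nodes = sorted(node for comm in communities for node in comm)
  let nodes : List Int := PySem.List.sorted (communities.flatten) (fun x => x) false
  -- dups = {b for a, b in zip(nodes, nodes[1:]) if a == b}
  let dups : PySem.Set Int :=
    (nodes.zip (PySem.List.slice nodes (some 1) none)).foldl
      (fun s p => if p.1 == p.2 then PySem.Set.add s p.2 else s) PySem.Set.empty
  -- {node for comm in communities for node in comm if node in dups}
  communities.foldl
    (fun s comm =>
      comm.foldl (fun s node => if PySem.Set.contains dups node then PySem.Set.add s node else s) s)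
    PySem.Set.empty

-- ===== PRECONDITION & SPEC =====
def Spec_find_overlapping_nodes (communities : List (List Int)) (out : List Int) : Prop := out = find_overlapping_nodes_alt communities
instance (communities : List (List Int)) (out : List Int) : Decidable (Spec_find_overlapping_nodes communities out) := by unfold Spec_find_overlapping_nodes; infer_instance

-- ===== CLAIM (what is proved, stated in full; the proofs are below) =====
def Claim_equal_find_overlapping_nodes : Prop := ∀ (communities : List (List Int)), Dom_find_overlapping_nodes communities → Spec_find_overlapping_nodes communities (find_overlapping_nodes communities)

-- ===== LEMMAS AND PROOFS =====

-- Folding `add when p` over a nodup list disjoint from the accumulator appends the filter.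
theorem foldl_if_add_filter (p : Int → Bool) :
    ∀ (l s : List Int), l.Nodup → (∀ x ∈ l, x ∉ s) →
      l.foldl (fun ov n => if p n then PySem.Set.add ov n else ov) s = s ++ l.filter p := by
  intro l
  induction l with
  | nil => intro s _ _; simp
  | cons n t ih =>
    intro s hnd hdisj
    simp only [List.foldl_cons, List.filter_cons]
    by_cases hp : p n
    · have hns : n ∉ s := hdisj n (by simp)
      have hadd : PySem.Set.add s n = s ++ [n] := by
        simp [PySem.Set.add, PySem.Set.contains, hns]
      rw [hp, if_pos rfl, hadd, ih (s ++ [n]) hnd.of_cons]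
      · simp
      · intro x hx
        simp only [List.mem_append, List.mem_singleton]
        rintro (h | rfl)
        · exact hdisj x (by simp [hx]) h
        · exact (List.nodup_cons.mp hnd).1 hx
    · rw [if_neg (by simp [hp]), ih s hnd.of_cons (fun x hx => hdisj x (by simp [hx]))]
      simp [hp]

-- Filtering commutes with Python set construction (first-occurrence dedup).
theorem filter_foldl_add (p : Int → Bool) :
    ∀ (l acc : List Int), acc.Nodup →
      (l.foldl PySem.Set.add acc).filter p
        = l.foldl (fun s n => if p n then PySem.Set.add s n else s) (acc.filter p) := by
  intro l
  induction l with
  | nil => intro acc _; simp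
  | cons n t ih =>
    intro acc hnd
    simp only [List.foldl_cons]
    by_cases hmem : n ∈ acc
    · have h1 : PySem.Set.add acc n = acc := by
        simp [PySem.Set.add, PySem.Set.contains, hmem]
      have h2 : (if p n then PySem.Set.add (acc.filter p) n else acc.filter p) = acc.filter p := by
        by_cases hp : p n
        · have : n ∈ acc.filter p := List.mem_filter.mpr ⟨hmem, hp⟩
          simp [hp, PySem.Set.add, PySem.Set.contains, this]
        · simp [hp]
      rw [h1, h2, ih acc hnd]
    · have h1 : PySem.Set.add acc n = acc ++ [n] := by
        simp [PySem.Set.add, PySem.Set.contains, hmem]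
      have hnd' : (acc ++ [n]).Nodup := by
        simp [List.nodup_append, hnd]
        intro a ha h
        exact hmem (h ▸ ha)
      have h2 : (acc ++ [n]).filter p
          = (if p n then PySem.Set.add (acc.filter p) n else acc.filter p) := by
        by_cases hp : p n
        · have hnm : n ∉ acc.filter p := fun h => hmem (List.mem_filter.mp h).1
          simp [hp, PySem.Set.add, PySem.Set.contains, hnm, List.filter_append]
        · simp [hp, List.filter_append]
      rw [h1, ih (acc ++ [n]) hnd', h2]

-- Membership in B's duplicate-collecting fold over the adjacent pairs.
theorem mem_dups_fold (x : Int) :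
    ∀ (l : List (Int × Int)) (s : List Int),
      (x ∈ l.foldl (fun s p => if p.1 == p.2 then PySem.Set.add s p.2 else s) s
        ↔ x ∈ s ∨ (x, x) ∈ l) := by
  intro l
  induction l with
  | nil => intro s; simp
  | cons q t ih =>
    intro s
    obtain ⟨q1, q2⟩ := q
    simp only [List.foldl_cons]
    by_cases hq : q1 = q2
    · subst hq
      rw [if_pos (by simp), ih]
      simp only [PySem.Set.mem_add, List.mem_cons, Prod.mk.injEq]
      tauto
    · rw [if_neg (by simpa using hq), ih]
      simp only [List.mem_cons, Prod.mk.injEq]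
      constructor
      · tauto
      · rintro (h | ⟨⟨rfl, rfl⟩, _⟩ | h) <;> tauto

-- In a ≤-sorted list, an adjacent equal pair with value x is exactly multiplicity ≥ 2.
theorem sorted_adj_pair_iff_two_le_count (x : Int) :
    ∀ (s : List Int), s.Pairwise (· ≤ ·) →
      ((x, x) ∈ s.zip s.tail ↔ 2 ≤ s.count x) := by
  intro s
  induction s with
  | nil => intro _; simp
  | cons h t ih =>
    intro hs
    cases t with
    | nil =>
      simp only [List.tail_cons, List.zip_nil_right, List.not_mem_nil, false_iff, not_le,
        List.count_cons, List.count_nil]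
      split_ifs <;> omega
    | cons y t' =>
      have hpt : (y :: t').Pairwise (· ≤ ·) := hs.of_cons
      have hhy : h ≤ y := (List.pairwise_cons.mp hs).1 y (by simp)
      have iht := ih hpt
      simp only [List.tail_cons] at iht ⊢
      rw [List.zip_cons_cons, List.mem_cons, iht]
      constructor
      · rintro (hpair | h2)
        · have e1 : x = h := congrArg Prod.fst hpair
          have e2 : x = y := congrArg Prod.snd hpair
          subst e1
          subst e2
          simp
        · rw [List.count_cons]
          omega
      · intro hcnt
        rw [List.count_cons] at hcnt
        by_cases hx : x = h
        · have h1 : 1 ≤ (y :: t').count x := by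
            split_ifs at hcnt <;> omega
          have hxin : x ∈ y :: t' := List.one_le_count_iff.mp h1
          have hyx : y ≤ x := by
            rcases List.mem_cons.mp hxin with h' | h'
            · exact le_of_eq h'.symm
            · exact (List.pairwise_cons.mp hpt).1 x h'
          have hxy : x ≤ y := by
            rw [hx]; exact hhy
          have hyeq : y = x := le_antisymm hyx hxy
          exact Or.inl (by simp [hx, hyeq])
        · refine Or.inr ?_
          split_ifs at hcnt with hc
          · simp at hc
            omega
          · exact hcnt

-- ===== VERDICT (by name: the statement is the Claim_ definition above) =====
theorem find_overlapping_nodes_spec : Claim_equal_find_overlapping_nodes := by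
  intro communities _
  unfold Spec_find_overlapping_nodes find_overlapping_nodes find_overlapping_nodes_alt
  simp only []
  set flat : List Int := communities.flatten with hflatdef
  set nodes : List Int := PySem.List.sorted flat (fun x => x) false with hnodes
  set dups : PySem.Set Int :=
    (nodes.zip (PySem.List.slice nodes (some 1) none)).foldl
      (fun s p => if p.1 == p.2 then PySem.Set.add s p.2 else s) PySem.Set.empty with hdups
  -- A's counting fold and B's final fold are folds over the flattened node list
  have hcounts :
      communities.foldl (fun d comm => comm.foldl (fun d node_index => d.modify node_index 0 (· + 1)) d) PySem.Dict.empty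
        = PySem.Dict.counter flat := by
    rw [PySem.Dict.counter_eq_foldl, hflatdef, List.foldl_flatten]
  have hBfold :
      communities.foldl
        (fun s comm =>
          comm.foldl (fun s node => if PySem.Set.contains dups node then PySem.Set.add s node else s) s)
        PySem.Set.empty
      = flat.foldl (fun s node => if PySem.Set.contains dups node then PySem.Set.add s node else s)
          PySem.Set.empty := by
    rw [hflatdef, List.foldl_flatten]
  rw [hcounts, hBfold]
  -- A's second loop = filter of the ordered key set by count>1
  rw [PySem.Dict.keys_counter]
  have hA := foldl_if_add_filter (fun n => decide (1 < (PySem.Dict.counter flat).getD n 0))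
      (PySem.Set.ofList flat) PySem.Set.empty (PySem.Set.nodup_ofList flat)
      (by intro x _ hx; simp [PySem.Set.empty] at hx)
  rw [show (fun (overlapping_nodes : List Int) node_index =>
        if 1 < (PySem.Dict.counter flat).getD node_index 0 then PySem.Set.add overlapping_nodes node_index
        else overlapping_nodes)
      = (fun (ov : List Int) n =>
        if decide (1 < (PySem.Dict.counter flat).getD n 0) = true then PySem.Set.add ov n else ov) by
    funext ov n; simp]
  rw [hA]
  -- B's final fold = filter of the ordered set by membership in dups
  have hB' :
      flat.foldl (fun s node => if PySem.Set.contains dups node then PySem.Set.add s node else s)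
          PySem.Set.empty
        = (PySem.Set.ofList flat).filter (fun n => PySem.Set.contains dups n) := by
    have h := filter_foldl_add (fun n => PySem.Set.contains dups n) flat [] (by simp)
    rw [PySem.Set.ofList_eq_foldl]
    simpa [PySem.Set.empty] using h.symm
  rw [hB']
  simp only [PySem.Set.empty, List.nil_append]
  -- the two filter predicates agree
  apply List.filter_congr
  intro x hx
  have hperm : nodes.Perm flat := PySem.List.sorted_perm flat (fun x => x) false
  have hsorted : nodes.Pairwise (· ≤ ·) := by
    have := PySem.List.sorted_pairwise flat (fun x => x)
    simpa using this
  have htail : PySem.List.slice nodes (some 1) none = nodes.tail := PySem.List.slice_from_one nodes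
  have hmem : x ∈ dups ↔ 2 ≤ flat.count x := by
    rw [hdups, htail, mem_dups_fold]
    simp only [PySem.Set.empty, List.not_mem_nil, false_or]
    rw [sorted_adj_pair_iff_two_le_count x nodes hsorted, hperm.count_eq x]
  rw [PySem.Dict.getD_counter, Bool.eq_iff_iff]
  simp only [PySem.Set.contains, decide_eq_true_eq, List.contains_iff_mem]
  rw [hmem]
  omega
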